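-- pv_equiv track=rewrite | github.com/allenai/gpv2 | gpv2/data/webqa_templates.py | _expand_templates
-- ===== SOURCE A (Python) =====
-- SUBSTITUIONS = {
--   "DT_OBJ": [
--     "this object", "this entity", "this thing",
--     "the object", "the entity",
--     "that object", "that entity",  "that thing"
--   ],
--   "DT": ["the", "this", "that"],
--   "OBJ": ['object', 'entity'],
--   "CMD": ["Describe", "State", "Specify", "Name"],
--   "NAME": ["Describe", "Specify", "Name", "Classify"],
--   "WH": ["What", "Which"]
-- }
--
-- def _expand_templates(templates):
--   for (prefix, subs) in SUBSTITUIONS.items():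
--     out = []
--     for template in templates:
--       if prefix in template:
--         for sub in subs:
--           out.append(template.replace(prefix, sub))
--       else:
--         out.append(template)
--     templates = out
--   return templates
-- ===== SOURCE B (Python) =====
-- SUBSTITUIONS = {
--   "DT_OBJ": [
--     "this object", "this entity", "this thing",
--     "the object", "the entity",
--     "that object", "that entity",  "that thing"
--   ],
--   "DT": ["the", "this", "that"],
--   "OBJ": ['object', 'entity'],
--   "CMD": ["Describe", "State", "Specify", "Name"],
--   "NAME": ["Describe", "Specify", "Name", "Classify"],
--   "WH": ["What", "Which"]
-- }
--
-- _RULES = list(SUBSTITUIONS.items())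
--
-- def _rec(s, rules):
--   if not rules:
--     return [s]
--   prefix, subs = rules[0]
--   rest = rules[1:]
--   if prefix in s:
--     return [r for sub in subs for r in _rec(s.replace(prefix, sub), rest)]
--   return _rec(s, rest)
--
-- def _expand_templates(templates):
--   return [r for t in templates for r in _rec(t, _RULES)]
-- ===== Notes on version B (the rewrite author's own statement) =====
-- stated objective: alternative
-- what changed: Replaces A's batch loop (outer over the six placeholder rules, rebuilding the whole template list each pass) with a per-template recursive expansion that consumes the rule list down each template, concatenating the results in input order.
import Mathlib
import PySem

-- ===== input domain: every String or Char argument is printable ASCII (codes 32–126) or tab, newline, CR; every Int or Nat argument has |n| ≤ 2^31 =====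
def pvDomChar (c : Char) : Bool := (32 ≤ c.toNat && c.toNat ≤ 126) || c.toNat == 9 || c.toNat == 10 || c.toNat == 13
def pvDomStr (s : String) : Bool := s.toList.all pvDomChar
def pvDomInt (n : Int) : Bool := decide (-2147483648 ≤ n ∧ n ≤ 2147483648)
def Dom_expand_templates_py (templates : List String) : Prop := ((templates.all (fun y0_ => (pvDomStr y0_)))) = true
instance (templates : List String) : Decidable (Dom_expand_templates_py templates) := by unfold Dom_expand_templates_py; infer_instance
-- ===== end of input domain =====

-- B replaces A's batch loop (rules outer, rebuilding the whole list per rule) with a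
-- per-template recursive expansion over the rule list; objective: alternative decomposition.

-- SUBSTITUIONS.items() as an ordered association list (shared module constant)
def pvSubstitutions : List (String × List String) :=
  [("DT_OBJ", ["this object", "this entity", "this thing",
               "the object", "the entity",
               "that object", "that entity", "that thing"]),
   ("DT", ["the", "this", "that"]),
   ("OBJ", ["object", "entity"]),
   ("CMD", ["Describe", "State", "Specify", "Name"]),
   ("NAME", ["Describe", "Specify", "Name", "Classify"]),
   ("WH", ["What", "Which"])]

-- ===== PORT A =====
def expand_templates_py (templates : List String) : List String :=
  pvSubstitutions.foldl
    (fun templates rule =>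
      templates.foldl
        (fun out template =>
          if PySem.Str.isIn rule.1 template then
            rule.2.foldl (fun out sub => out ++ [PySem.Str.replace template rule.1 sub]) out
          else
            out ++ [template])
        [])
    templates

-- ===== PORT B =====
def pvRec (s : String) : List (String × List String) → List String
  | [] => [s]
  | rule :: rest =>
      if PySem.Str.isIn rule.1 s then
        rule.2.flatMap (fun sub => pvRec (PySem.Str.replace s rule.1 sub) rest)
      else
        pvRec s rest

def expand_templates_py_alt (templates : List String) : List String :=
  templates.flatMap (fun t => pvRec t pvSubstitutions)

-- ===== PRECONDITION & SPEC =====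
def Spec_expand_templates_py (templates : List String) (out : List String) : Prop := out = expand_templates_py_alt templates
instance (templates : List String) (out : List String) : Decidable (Spec_expand_templates_py templates out) := by unfold Spec_expand_templates_py; infer_instance

-- ===== CLAIM (what is proved, stated in full; the proofs are below) =====
def Claim_equal_expand_templates_py : Prop := ∀ (templates : List String), Dom_expand_templates_py templates → Spec_expand_templates_py templates (expand_templates_py templates)

-- ===== LEMMAS AND PROOFS =====

-- one pass of A over a template list is a flatMap of the per-template one-rule expansion
theorem pvStepA_eq (ts : List String) (rule : String × List String) :
    ts.foldl
      (fun out template =>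
        if PySem.Str.isIn rule.1 template then
          rule.2.foldl (fun out sub => out ++ [PySem.Str.replace template rule.1 sub]) out
        else
          out ++ [template])
      [] =
    ts.flatMap (fun t =>
      if PySem.Str.isIn rule.1 t then
        rule.2.map (fun sub => PySem.Str.replace t rule.1 sub)
      else [t]) := by
  have h : ∀ (ts : List String) (acc : List String),
      ts.foldl
        (fun out template =>
          if PySem.Str.isIn rule.1 template then
            rule.2.foldl (fun out sub => out ++ [PySem.Str.replace template rule.1 sub]) out
          else
            out ++ [template])
        acc =
      acc ++ ts.flatMap (fun t =>
        if PySem.Str.isIn rule.1 t then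
          rule.2.map (fun sub => PySem.Str.replace t rule.1 sub)
        else [t]) := by
    intro ts
    induction ts with
    | nil => simp
    | cons t ts ih =>
        intro acc
        rw [List.foldl_cons, List.flatMap_cons]
        by_cases hp : PySem.Str.isIn rule.1 t
        · rw [if_pos hp, if_pos hp, PySem.List.foldl_append_singleton_eq_map, ih,
            List.append_assoc]
        · rw [if_neg hp, if_neg hp, ih, List.append_assoc, List.singleton_append]
  simpa using h ts []

-- A's whole fold over the rules equals flatMapping B's recursion over each template
theorem pvFold_eq_rec (rules : List (String × List String)) (ts : List String) :
    rules.foldl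
      (fun templates rule =>
        templates.foldl
          (fun out template =>
            if PySem.Str.isIn rule.1 template then
              rule.2.foldl (fun out sub => out ++ [PySem.Str.replace template rule.1 sub]) out
            else
              out ++ [template])
          [])
      ts =
    ts.flatMap (fun t => pvRec t rules) := by
  induction rules generalizing ts with
  | nil => simp [pvRec]
  | cons rule rest ih =>
      rw [List.foldl_cons, ih, pvStepA_eq, List.flatMap_assoc]
      refine List.flatMap_congr ?_
      intro t _
      by_cases hp : PySem.Str.isIn rule.1 t
      · simp only [pvRec]
        rw [if_pos hp, if_pos hp, List.flatMap_map]
      · simp only [pvRec]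
        rw [if_neg hp, if_neg hp, List.flatMap_singleton]

-- ===== VERDICT (by name: the statement is the Claim_ definition above) =====
theorem expand_templates_py_spec : Claim_equal_expand_templates_py := by
  intro templates _
  unfold Spec_expand_templates_py expand_templates_py expand_templates_py_alt
  exact pvFold_eq_rec pvSubstitutions templates
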